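-- pv_equiv track=rewrite | github.com/iliya-zholnerchik/AOIS2023 | LW4/calculate.py | reduced_dnf
-- ===== SOURCE A (Python) =====
-- def reduced_dnf(any_sdnf):
--     new_any_sdnf=[]
--     counter = 0
--     temp = ''
--     for literal in any_sdnf:
--         counter += 1
--         if int(literal) <= 3:
--             temp += '1'
--         else:
--             temp += '0'
--         if counter == 3:
--             counter = 0
--             new_any_sdnf.append(temp)
--             temp = ''
--
--     any_sdnf = ''
--
--     for iterator in range(len(new_any_sdnf)):
--
--         for val in range(iterator + 1, len(new_any_sdnf)):
--             if new_any_sdnf[iterator][0] == new_any_sdnf[val][0] and new_any_sdnf[iterator][1] == new_any_sdnf[val][1]: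
--                 any_sdnf += (new_any_sdnf[iterator][0] + new_any_sdnf[iterator][1] + '_')
--
--
--             elif new_any_sdnf[iterator][1] == new_any_sdnf[val][1] and new_any_sdnf[iterator][2] == new_any_sdnf[val][2]:
--                 any_sdnf += ('_' + (new_any_sdnf[iterator])[1] + (new_any_sdnf[iterator])[2])
--
--
--             elif new_any_sdnf[iterator][0] == new_any_sdnf[val][0] and new_any_sdnf[iterator][2] == new_any_sdnf[val][2]:
--                 any_sdnf += (new_any_sdnf[iterator][0] + '_' + new_any_sdnf[iterator][2])
--     rxnf = []
--     for iterator in range(len(any_sdnf)):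
--         if any_sdnf[iterator] == '0':
--             rxnf.append(str(iterator % 3 + 1 + 3))
--         elif any_sdnf[iterator] == '1':
--             rxnf.append(str(iterator % 3 + 1))
--
--     return rxnf
-- ===== SOURCE B (Python) =====
-- # Integer re-implementation: each 3-literal block becomes a 3-bit integer, the
-- # pair case is classified by XOR against a fixed table, and the output digits
-- # are emitted directly from the bits -- no pattern strings, no rescanning pass.
--
-- XCASE = {0: 6, 1: 6, 4: 3, 2: 5}  # xor-of-codes -> bitmask of the positions kept
--
--
-- def _vals(bits):
--     if len(bits) < 3:
--         return []
--     return [4 * bits[0] + 2 * bits[1] + bits[2]] + _vals(bits[3:])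
--
--
-- def _digits(a, b):
--     m = XCASE.get(a ^ b)
--     if m is None:
--         return []
--     out = []
--     for p, w in ((0, 4), (1, 2), (2, 1)):
--         if m // w % 2:
--             out.append(str(p + 1) if a // w % 2 else str(p + 4))
--     return out
--
--
-- def _pairs(vals):
--     if not vals:
--         return []
--     a, rest = vals[0], vals[1:]
--     out = []
--     for b in rest:
--         out += _digits(a, b)
--     return out + _pairs(rest)
--
--
-- def reduced_dnf(any_sdnf):
--     return _pairs(_vals([1 if int(lit) <= 3 else 0 for lit in any_sdnf]))
-- ===== Notes on version B (the rewrite author's own statement) =====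
-- stated objective: alternative
-- what changed: B changes the data representation: each 3-literal block is encoded recursively as a 3-bit integer, each pair is classified by XOR against a fixed 4-entry table instead of A's char-by-char elif chain, and the output digits are read straight off the integer's bits in one suffix-recursive pairwise pass - A's intermediate pattern string and its third index%3 rescanning pass disappear.
import Mathlib
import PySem

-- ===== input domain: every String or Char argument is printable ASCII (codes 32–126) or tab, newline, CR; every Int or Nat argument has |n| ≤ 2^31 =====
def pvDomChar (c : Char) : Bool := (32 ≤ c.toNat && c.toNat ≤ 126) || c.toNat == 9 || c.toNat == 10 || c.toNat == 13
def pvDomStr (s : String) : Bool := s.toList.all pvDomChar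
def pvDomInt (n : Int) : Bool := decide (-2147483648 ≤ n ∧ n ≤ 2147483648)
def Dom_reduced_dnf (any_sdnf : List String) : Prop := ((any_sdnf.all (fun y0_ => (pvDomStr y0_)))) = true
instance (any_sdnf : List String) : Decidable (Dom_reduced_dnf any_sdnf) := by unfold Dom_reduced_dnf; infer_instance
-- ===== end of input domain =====

-- B re-represents each 3-literal block as a 3-bit integer, classifies every pair by
-- XOR against a fixed table and emits the output digits directly from the bits —
-- no pattern strings, no third rescanning pass. Objective: alternative.

-- ===== PORT A =====
-- int(literal) <= 3 → '1' else '0';  int(literal) raises ValueError when ofStr? = none (excluded by Pre_)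
def pvA_bit (lit : String) : Char :=
  if (PySem.Int.ofStr? lit).getD 0 ≤ 3 then '1' else '0'

-- one step of A's first loop, state = (new_any_sdnf, counter, temp)
def pvA_step (st : List (List Char) × Int × List Char) (lit : String) :
    List (List Char) × Int × List Char :=
  let counter := st.2.1 + 1
  let temp := st.2.2 ++ [pvA_bit lit]
  if counter == 3 then (st.1 ++ [temp], 0, []) else (st.1, counter, temp)

-- the if/elif chain of A's pairwise loop: the 3 chars appended to any_sdnf ('' when no case fires)
def pvA_pairChunk (a b : List Char) : List Char :=
  if a.getD 0 ' ' == b.getD 0 ' ' && a.getD 1 ' ' == b.getD 1 ' ' then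
    [a.getD 0 ' ', a.getD 1 ' ', '_']
  else if a.getD 1 ' ' == b.getD 1 ' ' && a.getD 2 ' ' == b.getD 2 ' ' then
    ['_', a.getD 1 ' ', a.getD 2 ' ']
  else if a.getD 0 ' ' == b.getD 0 ' ' && a.getD 2 ' ' == b.getD 2 ' ' then
    [a.getD 0 ' ', '_', a.getD 2 ' ']
  else []

-- A's nested i<j loop building the string any_sdnf
def pvA_pairs (new : List (List Char)) : List Char :=
  (List.range new.length).foldl (fun acc i =>
    (List.range' (i + 1) (new.length - (i + 1))).foldl (fun acc2 j =>
      acc2 ++ pvA_pairChunk (new.getD i []) (new.getD j [])) acc) []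

-- A's third loop: index scan of the string with iterator % 3
def pvA_phase3 (s : List Char) : List String :=
  (List.range s.length).foldl (fun rxnf i =>
    if s.getD i ' ' == '0' then rxnf ++ [PySem.Int.toStr ((i % 3 + 1 + 3 : Nat) : Int)]
    else if s.getD i ' ' == '1' then rxnf ++ [PySem.Int.toStr ((i % 3 + 1 : Nat) : Int)]
    else rxnf) []

def reduced_dnf (any_sdnf : List String) : List String :=
  pvA_phase3 (pvA_pairs (any_sdnf.foldl pvA_step ([], 0, [])).1)

-- ===== PORT B =====
-- Source B XCASE: xor-of-codes → bitmask of kept positions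
def pvXCASE : PySem.Dict Int Int := PySem.Dict.ofList [(0, 6), (1, 6), (4, 3), (2, 5)]

-- Source B _vals: recursive 3-bit integer encoding of consecutive literal triples
def pvB_vals : List Int → List Int
  | b0 :: b1 :: b2 :: rest => (4 * b0 + 2 * b1 + b2) :: pvB_vals rest
  | [] => []
  | [_] => []
  | [_, _] => []

-- Source B _digits: classify the pair by XOR, emit the digits straight from a's bits
def pvB_digits (a b : Int) : List String :=
  match pvXCASE.get? (Int.xor a b) with
  | none => []
  | some m =>
    ([((0 : Int), (4 : Int)), (1, 2), (2, 1)]).foldl (fun out pw =>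
      if PySem.Int.mod (PySem.Int.floordiv m pw.2) 2 != 0 then
        out ++ [if PySem.Int.mod (PySem.Int.floordiv a pw.2) 2 != 0 then
                  PySem.Int.toStr (pw.1 + 1) else PySem.Int.toStr (pw.1 + 4)]
      else out) []

-- Source B _pairs: recursion over suffixes
def pvB_pairs : List Int → List String
  | [] => []
  | a :: rest => rest.foldl (fun out b => out ++ pvB_digits a b) [] ++ pvB_pairs rest

def reduced_dnf_alt (any_sdnf : List String) : List String :=
  pvB_pairs (pvB_vals (any_sdnf.map (fun lit =>
    if (PySem.Int.ofStr? lit).getD 0 ≤ 3 then (1 : Int) else 0)))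

-- ===== PRECONDITION & SPEC =====
-- Pre_ excludes exactly the inputs where int(literal) raises ValueError (both A and B raise there)
def Pre_reduced_dnf (any_sdnf : List String) : Prop :=
  (any_sdnf.all (fun s => (PySem.Int.ofStr? s).isSome)) = true
instance (any_sdnf : List String) : Decidable (Pre_reduced_dnf any_sdnf) := by
  unfold Pre_reduced_dnf; infer_instance

def pvWitness_reduced_dnf : List String := ["1", "2", "5", "0", "2", "7"]

def Spec_reduced_dnf (any_sdnf : List String) (out : List String) : Prop := out = reduced_dnf_alt any_sdnf
instance (any_sdnf : List String) (out : List String) : Decidable (Spec_reduced_dnf any_sdnf out) := by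
  unfold Spec_reduced_dnf; infer_instance

-- ===== CLAIM (what is proved, stated in full; the proofs are below) =====
def Claim_equal_reduced_dnf : Prop := ∀ (any_sdnf : List String), Dom_reduced_dnf any_sdnf → Pre_reduced_dnf any_sdnf → Spec_reduced_dnf any_sdnf (reduced_dnf any_sdnf)

-- ===== LEMMAS AND PROOFS =====

-- proof-only helpers: boolean view of the bit decision, 3-chunking, char-chunk encoding
def pvChB (p : Bool) : Char := if p then '1' else '0'
def pvIvB (p : Bool) : Int := if p then 1 else 0
def pvCondB (lit : String) : Bool := decide ((PySem.Int.ofStr? lit).getD 0 ≤ 3)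

def pvB_chunks3 : List Char → List (List Char)
  | a :: b :: c :: rest => [a, b, c] :: pvB_chunks3 rest
  | [] => []
  | [_] => []
  | [_, _] => []

def pvEncC (c : List Char) : Int :=
  (if c.getD 0 ' ' == '1' then 4 else 0) + (if c.getD 1 ' ' == '1' then 2 else 0) +
  (if c.getD 2 ' ' == '1' then 1 else 0)

-- generic suffix-recursive pair loop (the shape of Source B's _pairs)
def pvPairsRec (D : List Char → List Char → List String) : List (List Char) → List String
  | [] => []
  | a :: rest => rest.foldl (fun out b => out ++ D a b) [] ++ pvPairsRec D rest

theorem pvA_bit_eq (lit : String) : pvA_bit lit = pvChB (pvCondB lit) := by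
  by_cases h : (PySem.Int.ofStr? lit).getD 0 ≤ 3 <;> simp [pvA_bit, pvChB, pvCondB, h]

-- A's phase-1 fold produces exactly the 3-chunking of the bit list
theorem pv_phase1_eq (lits : List String) (acc : List (List Char)) :
    (lits.foldl pvA_step (acc, 0, [])).1 = acc ++ pvB_chunks3 (lits.map pvA_bit) := by
  match lits with
  | [] => simp [pvB_chunks3]
  | [a] => simp [pvA_step, pvB_chunks3]
  | [a, b] => simp [pvA_step, pvB_chunks3]
  | a :: b :: c :: rest =>
    have ih := pv_phase1_eq rest (acc ++ [[pvA_bit a, pvA_bit b, pvA_bit c]])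
    simp [pvA_step, pvB_chunks3] at ih ⊢
    exact ih

-- a pair chunk is 3 chars or empty
theorem pv_pairChunk_len (a b : List Char) :
    (pvA_pairChunk a b).length = 3 ∨ pvA_pairChunk a b = [] := by
  unfold pvA_pairChunk; split_ifs <;> simp

-- index-free form of A's phase 3
def pvGo : List Char → Nat → List String
  | [], _ => []
  | c :: cs, i =>
    (if c == '0' then [PySem.Int.toStr ((i % 3 + 1 + 3 : Nat) : Int)]
     else if c == '1' then [PySem.Int.toStr ((i % 3 + 1 : Nat) : Int)]
     else []) ++ pvGo cs (i + 1)

theorem pv_phase3_aux (u : List Char) (rest : List Char) : ∀ (t : List Char), u = t ++ rest → ∀ acc,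
    (List.range' t.length rest.length).foldl (fun rxnf i =>
      if u.getD i ' ' == '0' then rxnf ++ [PySem.Int.toStr ((i % 3 + 1 + 3 : Nat) : Int)]
      else if u.getD i ' ' == '1' then rxnf ++ [PySem.Int.toStr ((i % 3 + 1 : Nat) : Int)]
      else rxnf) acc = acc ++ pvGo rest t.length := by
  induction rest with
  | nil => simp [pvGo]
  | cons c cs ih =>
    intro t hu acc
    have hget : u.getD t.length ' ' = c := by
      subst hu; simp [List.getD]
    have hr : List.range' t.length (c :: cs).length = t.length :: List.range' (t.length + 1) cs.length := by
      simp [List.range'_succ]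
    have ih' := ih (t ++ [c]) (by simp [hu])
    have hlen : (t ++ [c]).length = t.length + 1 := by simp
    rw [hlen] at ih'
    rw [hr, List.foldl_cons, ih']
    simp only [pvGo, hget]
    split_ifs <;> simp

theorem pv_phase3_eq (s : List Char) : pvA_phase3 s = pvGo s 0 := by
  have := pv_phase3_aux s s [] (by simp) []
  simpa [pvA_phase3, List.range_eq_range'] using this

theorem pvGo_append (xs ys : List Char) (i : Nat) :
    pvGo (xs ++ ys) i = pvGo xs i ++ pvGo ys (i + xs.length) := by
  induction xs generalizing i with
  | nil => simp [pvGo]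
  | cons c cs ih => simp [pvGo, ih, Nat.add_assoc, Nat.add_comm 1]

-- pvGo on a 3-char chunk only sees the start index mod 3
theorem pvGo_chunk0 (a b c : Char) (i : Nat) (h : i % 3 = 0) :
    pvGo [a, b, c] i = pvGo [a, b, c] 0 := by
  have h1 : (i + 1) % 3 = 1 := by omega
  have h2 : (i + 1 + 1) % 3 = 2 := by omega
  simp only [pvGo, h, h1, h2]

-- inner-loop fusion: phase 3 distributes over the appended 3-char (or empty) chunks
theorem pv_inner (G : Nat → List Char) (hG : ∀ j, (G j).length = 3 ∨ G j = [])
    (js : List Nat) (sacc : List Char) (h : sacc.length % 3 = 0) :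
    pvGo (js.foldl (fun s j => s ++ G j) sacc) 0
      = js.foldl (fun r j => r ++ pvGo (G j) 0) (pvGo sacc 0)
    ∧ (js.foldl (fun s j => s ++ G j) sacc).length % 3 = 0 := by
  induction js generalizing sacc with
  | nil => exact ⟨rfl, h⟩
  | cons j js ih =>
    have hstep : pvGo (sacc ++ G j) 0 = pvGo sacc 0 ++ pvGo (G j) 0 := by
      rcases hG j with h3 | hnil
      · obtain ⟨a, b, c, hc⟩ := List.length_eq_three.1 h3
        rw [hc, pvGo_append, pvGo_chunk0 a b c _ (by omega)]
      · simp [hnil, pvGo]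
    have hlen : (sacc ++ G j).length % 3 = 0 := by
      rcases hG j with h3 | hnil
      · simp [h3]; omega
      · simp [hnil, h]
    have := ih (sacc ++ G j) hlen
    simpa [hstep] using this

theorem pv_outer (codes : List (List Char)) (is : List Nat) (sacc : List Char)
    (h : sacc.length % 3 = 0) :
    pvGo (is.foldl (fun s i =>
        (List.range' (i + 1) (codes.length - (i + 1))).foldl (fun s2 j =>
          s2 ++ pvA_pairChunk (codes.getD i []) (codes.getD j [])) s) sacc) 0
      = is.foldl (fun r i =>
          (List.range' (i + 1) (codes.length - (i + 1))).foldl (fun r2 j =>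
            r2 ++ pvGo (pvA_pairChunk (codes.getD i []) (codes.getD j [])) 0) r) (pvGo sacc 0)
    ∧ (is.foldl (fun s i =>
        (List.range' (i + 1) (codes.length - (i + 1))).foldl (fun s2 j =>
          s2 ++ pvA_pairChunk (codes.getD i []) (codes.getD j [])) s) sacc).length % 3 = 0 := by
  induction is generalizing sacc with
  | nil => exact ⟨rfl, h⟩
  | cons i is ih =>
    have hin := pv_inner (fun j => pvA_pairChunk (codes.getD i []) (codes.getD j []))
      (fun j => pv_pairChunk_len _ _) (List.range' (i + 1) (codes.length - (i + 1))) sacc h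
    have := ih _ hin.2
    simp only [List.foldl_cons]
    rw [this.1, hin.1]
    exact ⟨rfl, this.2⟩

-- factor an accumulator out of an append-fold
theorem pv_foldl_app {α β : Type} (g : α → List β) (l : List α) (acc : List β) :
    l.foldl (fun r x => r ++ g x) acc = acc ++ l.foldl (fun r x => r ++ g x) [] := by
  induction l generalizing acc with
  | nil => simp
  | cons x xs ih =>
    rw [List.foldl_cons, List.foldl_cons, List.nil_append, ih (acc ++ g x), ih (g x)]
    simp

-- an index-range fold over getD is the fold over the dropped suffix
theorem pv_range_getD (g : List Char → List String) (L : List (List Char)) :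
    ∀ (suffix : List (List Char)) (k : Nat), L.drop k = suffix → ∀ acc,
    (List.range' k (L.length - k)).foldl (fun r j => r ++ g (L.getD j [])) acc
      = suffix.foldl (fun r b => r ++ g b) acc := by
  intro suffix
  induction suffix with
  | nil =>
    intro k hk acc
    have : L.length ≤ k := List.drop_eq_nil_iff.1 hk
    simp [Nat.sub_eq_zero_of_le this]
  | cons b bs ih =>
    intro k hk acc
    have hklt : k < L.length := by
      by_contra hge
      rw [List.drop_eq_nil_of_le (by omega)] at hk
      exact (List.cons_ne_nil b bs) hk.symm
    have hget : L.getD k [] = b := by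
      have h0 : (L.drop k)[0]? = some b := by rw [hk]; rfl
      rw [List.getElem?_drop] at h0
      simp only [Nat.add_zero] at h0
      simp [List.getD, h0]
    have hdrop : L.drop (k + 1) = bs := by
      have := congrArg List.tail hk
      simpa using this
    have hr : List.range' k (L.length - k)
        = k :: List.range' (k + 1) (L.length - (k + 1)) := by
      have : L.length - k = (L.length - (k + 1)) + 1 := by omega
      rw [this, List.range'_succ]
    rw [hr, List.foldl_cons, hget, ih (k + 1) hdrop, List.foldl_cons]

-- the nested index loops are the suffix recursion pvPairsRec
theorem pv_idx_rec (D : List Char → List Char → List String) (L : List (List Char)) :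
    ∀ (suffix : List (List Char)) (k : Nat), L.drop k = suffix → ∀ acc,
    (List.range' k (L.length - k)).foldl (fun r i =>
      (List.range' (i + 1) (L.length - (i + 1))).foldl (fun r2 j =>
        r2 ++ D (L.getD i []) (L.getD j [])) r) acc
      = acc ++ pvPairsRec D suffix := by
  intro suffix
  induction suffix with
  | nil =>
    intro k hk acc
    have : L.length ≤ k := List.drop_eq_nil_iff.1 hk
    simp [Nat.sub_eq_zero_of_le this, pvPairsRec]
  | cons a rest ih =>
    intro k hk acc
    have hklt : k < L.length := by
      by_contra hge
      rw [List.drop_eq_nil_of_le (by omega)] at hk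
      exact (List.cons_ne_nil a rest) hk.symm
    have hget : L.getD k [] = a := by
      have h0 : (L.drop k)[0]? = some a := by rw [hk]; rfl
      rw [List.getElem?_drop] at h0
      simp only [Nat.add_zero] at h0
      simp [List.getD, h0]
    have hdrop : L.drop (k + 1) = rest := by
      have := congrArg List.tail hk
      simpa using this
    have hr : List.range' k (L.length - k)
        = k :: List.range' (k + 1) (L.length - (k + 1)) := by
      have : L.length - k = (L.length - (k + 1)) + 1 := by omega
      rw [this, List.range'_succ]
    rw [hr, List.foldl_cons, hget,
      pv_range_getD (fun b => D a b) L rest (k + 1) hdrop acc,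
      pv_foldl_app (fun b => D a b) rest acc, ih (k + 1) hdrop]
    simp [pvPairsRec]

-- every chunk of a '0'/'1' char list is a 3-char boolean chunk
theorem pv_chunks_shape (bs : List Bool) :
    ∀ c ∈ pvB_chunks3 (bs.map pvChB), ∃ p q r : Bool, c = [pvChB p, pvChB q, pvChB r] := by
  match bs with
  | [] => simp [pvB_chunks3]
  | [p] => simp [pvB_chunks3]
  | [p, q] => simp [pvB_chunks3]
  | p :: q :: r :: rest =>
    intro c hc
    simp only [List.map, pvB_chunks3, List.mem_cons] at hc
    rcases hc with h | h
    · exact ⟨p, q, r, h⟩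
    · exact pv_chunks_shape rest c h

-- Source B's integer codes are the encodings of A's char chunks
theorem pv_vals_eq (bs : List Bool) :
    pvB_vals (bs.map pvIvB) = (pvB_chunks3 (bs.map pvChB)).map pvEncC := by
  match bs with
  | [] => simp [pvB_vals, pvB_chunks3]
  | [p] => simp [pvB_vals, pvB_chunks3]
  | [p, q] => simp [pvB_vals, pvB_chunks3]
  | p :: q :: r :: rest =>
    have ih := pv_vals_eq rest
    simp only [List.map, pvB_vals, pvB_chunks3, List.map_cons, ih, List.cons.injEq, and_true]
    cases p <;> cases q <;> cases r <;> decide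

-- the 64-case core: A's pattern chunk rendered by phase 3 = Source B's direct digit emission
theorem pv_pair_core (p q r s t u : Bool) :
    pvGo (pvA_pairChunk [pvChB p, pvChB q, pvChB r] [pvChB s, pvChB t, pvChB u]) 0
      = pvB_digits (pvEncC [pvChB p, pvChB q, pvChB r]) (pvEncC [pvChB s, pvChB t, pvChB u]) := by
  cases p <;> cases q <;> cases r <;> cases s <;> cases t <;> cases u <;> decide

-- pvPairsRec over char chunks = Source B's _pairs over the encoded integers
theorem pv_rec_map (codes : List (List Char))
    (hsh : ∀ c ∈ codes, ∃ p q r : Bool, c = [pvChB p, pvChB q, pvChB r]) :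
    pvPairsRec (fun a b => pvGo (pvA_pairChunk a b) 0) codes = pvB_pairs (codes.map pvEncC) := by
  induction codes with
  | nil => simp [pvPairsRec, pvB_pairs]
  | cons a rest ih =>
    obtain ⟨p, q, r, ha⟩ := hsh a (List.mem_cons_self)
    have hinner : rest.foldl (fun out b => out ++ pvGo (pvA_pairChunk a b) 0) []
        = (rest.map pvEncC).foldl (fun out vb => out ++ pvB_digits (pvEncC a) vb) [] := by
      rw [List.foldl_map]
      apply PySem.List.foldl_congr_mem _ _ _ _
      intro acc b hb
      obtain ⟨s, t, u, hbs⟩ := hsh b (List.mem_cons_of_mem _ hb)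
      rw [ha, hbs, pv_pair_core]
    simp only [pvPairsRec, pvB_pairs, List.map_cons, hinner,
      ih (fun c hc => hsh c (List.mem_cons_of_mem _ hc))]

-- ===== VERDICT (by name: the statement is the Claim_ definition above) =====
theorem reduced_dnf_spec : Claim_equal_reduced_dnf := by
  intro any_sdnf _ _
  unfold Spec_reduced_dnf reduced_dnf reduced_dnf_alt
  rw [pv_phase1_eq any_sdnf []]
  have hA : any_sdnf.map pvA_bit = (any_sdnf.map pvCondB).map pvChB := by
    rw [List.map_map]; exact List.map_congr_left fun lit _ => pvA_bit_eq lit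
  have hB : any_sdnf.map (fun lit => if (PySem.Int.ofStr? lit).getD 0 ≤ 3 then (1 : Int) else 0)
      = (any_sdnf.map pvCondB).map pvIvB := by
    rw [List.map_map]
    refine List.map_congr_left fun lit _ => ?_
    by_cases h : (PySem.Int.ofStr? lit).getD 0 ≤ 3 <;> simp [pvCondB, pvIvB, h]
  set bs := any_sdnf.map pvCondB with hbs
  set codes := pvB_chunks3 (bs.map pvChB) with hcodes
  rw [List.nil_append, hA, ← hcodes, pv_phase3_eq]
  have hout := pv_outer codes (List.range codes.length) [] (by simp)
  have hgo0 : pvGo [] 0 = [] := rfl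
  unfold pvA_pairs
  have hidx := pv_idx_rec (fun a b => pvGo (pvA_pairChunk a b) 0) codes codes 0 (by simp) []
  simp only [Nat.sub_zero] at hidx
  rw [hout.1, hgo0, List.range_eq_range', hidx,
    List.nil_append, pv_rec_map codes (pv_chunks_shape bs), hB, pv_vals_eq bs, hcodes]
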